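-- pv_equiv track=rewrite | github.com/VUmcCGP/wisecondor | lib/wisetools.py | split_by_chrom
-- ===== SOURCE A (Python) =====
-- def split_by_chrom(start, end, chromosome_bin_sums):
--     areas = []
--     tmp = [0, start, 0]
--     for i, val in enumerate(chromosome_bin_sums):
--         tmp[0] = i
--         if val >= end:
--             break
--         if start < val < end:
--             tmp[2] = val
--             areas.append(tmp)
--             tmp = [i, val, 0]
--         tmp[1] = val
--     tmp[2] = end
--     areas.append(tmp)
--     return areas
-- ===== SOURCE B (Python) =====
-- def split_by_chrom(start, end, chromosome_bin_sums):
--     n = len(chromosome_bin_sums)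
--     # index of the first bin sum >= end (the loop's break point), or n if none
--     b = next((i for i, v in enumerate(chromosome_bin_sums) if v >= end), n)
--     head = chromosome_bin_sums[:b]
--     prevs = [start] + head
--     areas = [[i, p, v] for i, (p, v) in enumerate(zip(prevs, head)) if start < v]
--     last_i = b if b < n else max(n - 1, 0)
--     areas.append([last_i, prevs[-1], end])
--     return areas
-- ===== Notes on version B (the rewrite author's own statement) =====
-- stated objective: simpler
-- what changed: Replaces A's stateful loop with a mutated tmp triple by a closed-form decomposition: locate the break index, slice the in-range prefix, build the segments with a comprehension over zip of the values with their predecessors, and append the final segment directly.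
import Mathlib
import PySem

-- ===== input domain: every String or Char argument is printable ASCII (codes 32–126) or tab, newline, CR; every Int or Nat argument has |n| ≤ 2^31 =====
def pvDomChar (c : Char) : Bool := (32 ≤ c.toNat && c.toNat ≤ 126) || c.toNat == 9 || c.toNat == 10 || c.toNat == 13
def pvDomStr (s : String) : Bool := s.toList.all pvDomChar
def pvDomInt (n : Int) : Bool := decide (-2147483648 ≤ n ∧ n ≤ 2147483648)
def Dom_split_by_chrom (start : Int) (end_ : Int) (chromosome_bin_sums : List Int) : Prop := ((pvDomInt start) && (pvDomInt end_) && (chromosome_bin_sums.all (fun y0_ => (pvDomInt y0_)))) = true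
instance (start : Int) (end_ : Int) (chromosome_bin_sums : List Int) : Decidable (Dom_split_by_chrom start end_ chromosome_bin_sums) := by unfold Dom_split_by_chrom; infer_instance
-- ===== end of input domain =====

-- B replaces A's stateful loop (mutated tmp triple, break) with a closed-form
-- decomposition: break index, sliced prefix, comprehension over zip with predecessors.

-- ===== PORT A =====
-- the for-loop of A: state = (areas, tmp); tmp is the mutated 3-element list [idx, prev, third];
-- returning early models `break`
def pvALoop (start end_ : Int) : Nat → List Int → List (List Int) → Int × Int × Int → List (List Int) × (Int × Int × Int)
  | _, [], areas, tmp => (areas, tmp)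
  | i, val :: rest, areas, tmp =>
    let tmp := ((i : Int), tmp.2.1, tmp.2.2)      -- tmp[0] = i
    if val ≥ end_ then (areas, tmp)               -- break
    else
      let st :=
        if start < val ∧ val < end_ then
          (areas ++ [[tmp.1, tmp.2.1, val]], ((i : Int), val, (0 : Int)))
        else (areas, tmp)
      pvALoop start end_ (i + 1) rest st.1 (st.2.1, val, st.2.2.2)   -- tmp[1] = val

def split_by_chrom (start : Int) (end_ : Int) (chromosome_bin_sums : List Int) : List (List Int) :=
  let r := pvALoop start end_ 0 chromosome_bin_sums [] (0, start, 0)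
  r.1 ++ [[r.2.1, r.2.2.1, end_]]                 -- tmp[2] = end; areas.append(tmp)

-- ===== PORT B =====
-- index of the first value >= end, or the length if none (Source B's `next(..., n)`)
def pvFirstGE (end_ : Int) : List Int → Nat
  | [] => 0
  | v :: rest => if v ≥ end_ then 0 else pvFirstGE end_ rest + 1

-- the comprehension `[[i, p, v] for i, (p, v) in enumerate(zip(prevs, head)) if start < v]`
def pvBList (start : Int) : Nat → List (Int × Int) → List (List Int)
  | _, [] => []
  | i, (p, v) :: rest =>
    (if start < v then [[(i : Int), p, v]] else []) ++ pvBList start (i + 1) rest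

def split_by_chrom_alt (start : Int) (end_ : Int) (chromosome_bin_sums : List Int) : List (List Int) :=
  let n := chromosome_bin_sums.length
  let b := pvFirstGE end_ chromosome_bin_sums
  let head := chromosome_bin_sums.take b
  let prevs := start :: head
  let areas := pvBList start 0 (prevs.zip head)
  let lastI : Int := if b < n then (b : Int) else max ((n : Int) - 1) 0
  areas ++ [[lastI, prevs.getLastD 0, end_]]      -- prevs[-1]; prevs is nonempty so the default is never used

-- ===== PRECONDITION & SPEC =====
def Spec_split_by_chrom (start : Int) (end_ : Int) (chromosome_bin_sums : List Int) (out : List (List Int)) : Prop := out = split_by_chrom_alt start end_ chromosome_bin_sums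
instance (start : Int) (end_ : Int) (chromosome_bin_sums : List Int) (out : List (List Int)) : Decidable (Spec_split_by_chrom start end_ chromosome_bin_sums out) := by unfold Spec_split_by_chrom; infer_instance

-- ===== CLAIM (what is proved, stated in full; the proofs are below) =====
def Claim_equal_split_by_chrom : Prop := ∀ (start : Int) (end_ : Int) (chromosome_bin_sums : List Int), Dom_split_by_chrom start end_ chromosome_bin_sums → Spec_split_by_chrom start end_ chromosome_bin_sums (split_by_chrom start end_ chromosome_bin_sums)

-- ===== LEMMAS AND PROOFS =====

-- full characterisation of A's loop in terms of B's pieces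
theorem pvALoop_eq (start end_ : Int) (xs : List Int) (i : Nat) (prev : Int)
    (areas : List (List Int)) (j : Int) :
    pvALoop start end_ i xs areas (j, prev, 0) =
      (areas ++ pvBList start i ((prev :: xs.take (pvFirstGE end_ xs)).zip (xs.take (pvFirstGE end_ xs))),
       ((if xs = [] then j
         else if pvFirstGE end_ xs < xs.length then ((i + pvFirstGE end_ xs : Nat) : Int)
         else ((i + xs.length - 1 : Nat) : Int)),
        (xs.take (pvFirstGE end_ xs)).getLastD prev, 0)) := by
  induction xs generalizing i prev areas j with
  | nil => simp [pvALoop, pvBList, pvFirstGE]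
  | cons v rest ih =>
    by_cases hge : v >= end_
    · simp [pvALoop, pvFirstGE, hge, pvBList]
    · have hlt : v < end_ := lt_of_not_ge hge
      by_cases hs : start < v
      · simp only [pvALoop, pvFirstGE, if_neg hge, if_pos (And.intro hs hlt), List.take_succ_cons,
          List.zip_cons_cons, pvBList, if_pos hs]
        rw [ih]
        simp only [Prod.mk.injEq]
        refine ⟨by simp, ?_, ?_, trivial⟩
        · simp only [List.length_cons]
          split_ifs with h1 h2 h3 <;> simp_all [pvFirstGE] <;> omega
        · rw [List.getLastD_cons]
      · simp only [pvALoop, pvFirstGE, if_neg hge]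
        have hcond : ¬ (start < v ∧ v < end_) := fun h => hs h.1
        simp only [if_neg hcond, List.take_succ_cons, List.zip_cons_cons, pvBList, if_neg hs]
        rw [ih]
        simp only [Prod.mk.injEq]
        refine ⟨by simp, ?_, ?_, trivial⟩
        · simp only [List.length_cons]
          split_ifs with h1 h2 h3 <;> simp_all [pvFirstGE] <;> omega
        · rw [List.getLastD_cons]

-- ===== VERDICT (by name: the statement is the Claim_ definition above) =====
theorem split_by_chrom_spec : Claim_equal_split_by_chrom := by
  intro start end_ xs _
  unfold Spec_split_by_chrom split_by_chrom split_by_chrom_alt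
  rw [pvALoop_eq]
  simp only [List.nil_append, Nat.zero_add]
  congr 1
  rcases xs with _ | ⟨v, vs⟩
  · simp [pvFirstGE]
  · have hne : (v :: vs) ≠ [] := by simp
    simp only [if_neg hne]
    congr 2
    · by_cases hb : pvFirstGE end_ (v :: vs) < (v :: vs).length
      · simp only [if_pos hb]
      · simp only [if_neg hb]
        simp only [List.length_cons] at *
        have : max (((vs.length : Int) + 1) - 1) 0 = ((vs.length : Int)) := by omega
        push_cast
        omega
    · rw [List.getLastD_cons]
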